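-- pv_equiv track=rewrite | github.com/CodyChew/TradeAutomation | strategies/lp_force_strike_strategy_lab/src/lp_force_strike_strategy_lab/live_trade_summary.py | _counter_text
-- ===== SOURCE A (Python) =====
-- from collections import Counter
-- from typing import Any, Sequence
--
-- def _counter_text(counter: Counter[str], preferred_order: Sequence[str]) -> str:
--     parts: list[str] = []
--     seen: set[str] = set()
--     for key in preferred_order:
--         if counter.get(key, 0) > 0:
--             parts.append(f"{key.title()} {counter[key]}")
--             seen.add(key)
--     for key, count in sorted(counter.items()):
--         if key not in seen and count > 0:
--             parts.append(f"{key.title()} {count}")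
--     return " | ".join(parts) if parts else "n/a"
-- ===== SOURCE B (Python) =====
-- def _counter_text(counter, preferred_order):
--     n = len(preferred_order)
--     pset = set(preferred_order)
--     tagged = [(i, k) for i, k in enumerate(preferred_order) if counter.get(k, 0) > 0]
--     tagged += [(n, k) for k, c in counter.items() if c > 0 and k not in pset]
--     tagged.sort()
--     parts = [f"{k.title()} {counter[k]}" for _, k in tagged]
--     return " | ".join(parts) if parts else "n/a"
-- ===== Notes on version B (the rewrite author's own statement) =====
-- stated objective: alternative
-- what changed: Replaces A's two-phase scan (preferred-order loop maintaining a seen-set, then a filtered pass over the key-sorted items) by one sort of an index-tagged union — positive preferred occurrences tagged with their index, other positive items tagged with len(preferred_order) — followed by a single formatting pass.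
import Mathlib
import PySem

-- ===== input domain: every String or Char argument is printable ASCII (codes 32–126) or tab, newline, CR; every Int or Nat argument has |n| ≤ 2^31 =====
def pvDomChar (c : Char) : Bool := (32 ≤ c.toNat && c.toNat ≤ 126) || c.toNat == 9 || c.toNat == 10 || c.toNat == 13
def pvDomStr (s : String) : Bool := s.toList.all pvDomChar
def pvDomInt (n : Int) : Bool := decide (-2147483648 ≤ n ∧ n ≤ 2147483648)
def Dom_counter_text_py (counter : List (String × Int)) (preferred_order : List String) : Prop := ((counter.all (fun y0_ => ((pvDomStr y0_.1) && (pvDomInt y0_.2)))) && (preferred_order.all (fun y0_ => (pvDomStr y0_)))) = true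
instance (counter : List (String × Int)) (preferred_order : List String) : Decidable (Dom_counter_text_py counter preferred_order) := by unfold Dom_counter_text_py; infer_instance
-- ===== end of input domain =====

-- B replaces A's two-phase scan (preferred loop with a seen-set, then a pass over the
-- key-sorted items) by one sort of an index-tagged union, then a single formatting pass
-- (alternative decomposition; not faster).

-- ===== PORT A =====
-- str.title() on the ASCII domain: a letter after a non-letter is uppercased, other letters lowercased
def pvTitleChars : Bool → List Char → List Char
  | _, [] => []
  | prevAlpha, c :: cs =>
    if c.isAlpha then (if prevAlpha then c.toLower else c.toUpper) :: pvTitleChars true cs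
    else c :: pvTitleChars false cs

-- f"{key.title()} {count}"  (shared formatting helper of both ports)
def pvFmt (k : String) (c : Int) : String :=
  String.ofList (pvTitleChars false k.toList ++ ' ' :: PySem.Int.toChars c)

def counter_text_py (counter : List (String × Int)) (preferred_order : List String) : String :=
  -- first loop: parts/seen over preferred_order
  let st := preferred_order.foldl
    (fun (acc : List String × PySem.Set String) key =>
      if decide ((List.lookup key counter).getD 0 > 0) then
        (acc.1 ++ [pvFmt key ((List.lookup key counter).getD 0)], PySem.Set.add acc.2 key)
      else acc)
    ([], PySem.Set.empty)
  -- second loop: over sorted(counter.items())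
  let parts := (PySem.List.sorted2 counter (fun kv => kv.1) (fun kv => kv.2)).foldl
    (fun parts kv =>
      if !(PySem.Set.contains st.2 kv.1) && decide (kv.2 > 0) then parts ++ [pvFmt kv.1 kv.2]
      else parts)
    st.1
  if parts = [] then "n/a" else PySem.Str.join " | " parts

-- ===== PORT B =====
def counter_text_py_alt (counter : List (String × Int)) (preferred_order : List String) : String :=
  let n : Int := preferred_order.length
  let pset := PySem.Set.ofList preferred_order
  -- tagged = positive preferred occurrences (tag = index) + positive non-preferred items (tag = n)
  let tagged := (PySem.List.enumerate preferred_order).filter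
      (fun p => decide ((List.lookup p.2 counter).getD 0 > 0))
    ++ (counter.filter (fun kv => decide (kv.2 > 0) && !PySem.Set.contains pset kv.1)).map
        (fun kv => ((n, kv.1) : Int × String))
  -- tagged.sort()
  let sortedTagged := PySem.List.sorted2 tagged (fun p => p.1) (fun p => p.2)
  let parts := sortedTagged.map (fun p => pvFmt p.2 ((List.lookup p.2 counter).getD 0))
  if parts = [] then "n/a" else PySem.Str.join " | " parts

-- ===== PRECONDITION & SPEC =====
-- Pre_ only requires distinct keys in the association list, which holds for every Python
-- dict (dict keys are unique); it excludes no input the Python function can receive.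
def Pre_counter_text_py (counter : List (String × Int)) (preferred_order : List String) : Prop :=
  (counter.map Prod.fst).Nodup
instance (counter : List (String × Int)) (preferred_order : List String) : Decidable (Pre_counter_text_py counter preferred_order) := by unfold Pre_counter_text_py; infer_instance
def pvWitness_counter_text_py : (List (String × Int)) × List String :=
  ([("a", 2), ("b", 0), ("c", 3)], ["c", "x", "c"])
def Spec_counter_text_py (counter : List (String × Int)) (preferred_order : List String) (out : String) : Prop := out = counter_text_py_alt counter preferred_order
instance (counter : List (String × Int)) (preferred_order : List String) (out : String) : Decidable (Spec_counter_text_py counter preferred_order out) := by unfold Spec_counter_text_py; infer_instance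

-- ===== CLAIM (what is proved, stated in full; the proofs are below) =====
def Claim_equal_counter_text_py : Prop := ∀ (counter : List (String × Int)) (preferred_order : List String), Dom_counter_text_py counter preferred_order → Pre_counter_text_py counter preferred_order → Spec_counter_text_py counter preferred_order (counter_text_py counter preferred_order)

-- ===== LEMMAS AND PROOFS =====

-- lookup in an association list with distinct keys is exactly membership
theorem pv_lookup_nodup (counter : List (String × Int)) (hnd : (counter.map Prod.fst).Nodup)
    (k : String) (v : Int) : (k, v) ∈ counter ↔ List.lookup k counter = some v := by
  induction counter with
  | nil => simp
  | cons p t ih =>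
    obtain ⟨pk, pv⟩ := p
    simp only [List.map_cons, List.nodup_cons] at hnd
    obtain ⟨h1, h2⟩ := hnd
    by_cases hk : k = pk
    · subst hk
      simp only [List.mem_cons, List.lookup, BEq.rfl, Prod.mk.injEq, true_and]
      constructor
      · rintro (h | h)
        · simp [h]
        · exact absurd (List.mem_map_of_mem (f := Prod.fst) h) h1
      · intro h; left; injection h with h; omega
    · simp only [List.mem_cons, List.lookup]
      rw [show ((k == pk) = false) from beq_false_of_ne hk]
      simp only [Prod.mk.injEq]
      rw [← ih h2]
      constructor
      · rintro (⟨h, _⟩ | h)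
        · exact absurd h hk
        · exact h
      · exact Or.inr

-- sorted2 is sorted under the lexicographic key
theorem pv_sorted2_eq_sorted_lex {α κ₁ κ₂ : Type} [LinearOrder κ₁] [LinearOrder κ₂]
    (xs : List α) (k1 : α → κ₁) (k2 : α → κ₂) :
    PySem.List.sorted2 xs k1 k2 = PySem.List.sorted xs (fun x => toLex (k1 x, k2 x)) := by
  unfold PySem.List.sorted2 PySem.List.sorted
  simp only [if_neg (by decide : ¬ (false = true))]
  congr 1
  funext acc x
  congr 1
  funext a b
  rcases lt_trichotomy (k1 a) (k1 b) with h | h | h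
  · simp [Prod.Lex.lt_iff, h]
  · simp [Prod.Lex.lt_iff, h]
  · simp [Prod.Lex.lt_iff, h, not_lt.2 (le_of_lt h), h.ne']

-- the two blocks of B's tagged list
def pvGroup1 (counter : List (String × Int)) (po : List String) : List (Int × String) :=
  (PySem.List.enumerate po).filter (fun p => decide ((List.lookup p.2 counter).getD 0 > 0))

def pvRest2 (counter : List (String × Int)) (po : List String) : List (Int × String) :=
  ((PySem.List.sorted2 counter (fun kv => kv.1) (fun kv => kv.2)).filter
    (fun kv => decide (kv.2 > 0) && !PySem.Set.contains (PySem.Set.ofList po) kv.1)).map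
      (fun kv => ((po.length : Int), kv.1))

-- B's sort returns the preferred block (already index-sorted) followed by the key-sorted rest
theorem pv_sortedTagged_eq (counter : List (String × Int)) (po : List String)
    (hc : (counter.map Prod.fst).Nodup) :
    PySem.List.sorted2
      (pvGroup1 counter po
        ++ (counter.filter (fun kv => decide (kv.2 > 0)
              && !PySem.Set.contains (PySem.Set.ofList po) kv.1)).map
            (fun kv => (((po.length : Int), kv.1) : Int × String)))
      (fun p => p.1) (fun p => p.2)
      = pvGroup1 counter po ++ pvRest2 counter po := by
  rw [pv_sorted2_eq_sorted_lex]
  apply PySem.List.sorted_eq_of_perm_of_pairwise_lt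
  · exact List.Perm.append_left _
      (((PySem.List.sorted2_perm counter _ _ false).filter _).map _)
  · rw [List.pairwise_append]
    refine ⟨?_, ?_, ?_⟩
    · refine ((PySem.List.pairwise_lt_enumerate po 0).filter _).imp ?_
      intro a b hab
      rw [Prod.Lex.lt_iff]
      simp only [ofLex_toLex]
      left; exact hab
    · unfold pvRest2
      rw [List.pairwise_map]
      have hs := pv_sorted2_eq_sorted_lex counter (fun kv => kv.1) (fun kv => kv.2)
      have hle : List.Pairwise (fun a b : String × Int =>
          (toLex (a.1, a.2) : String ×ₗ Int) ≤ toLex (b.1, b.2))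
          (PySem.List.sorted2 counter (fun kv => kv.1) (fun kv => kv.2)) := by
        rw [hs]; exact PySem.List.sorted_pairwise _ _
      have hnodup : ((PySem.List.sorted2 counter (fun kv => kv.1) (fun kv => kv.2) false).map Prod.fst).Nodup := by
        rw [((PySem.List.sorted2_perm counter _ _ false).map Prod.fst).nodup_iff]
        exact hc
      have hne : List.Pairwise (fun a b : String × Int => a.1 ≠ b.1)
          (PySem.List.sorted2 counter (fun kv => kv.1) (fun kv => kv.2)) := by
        rw [← List.pairwise_map (f := Prod.fst)]
        exact hnodup
      refine ((hle.and hne).filter _).imp ?_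
      rintro a b ⟨hab, habne⟩
      rw [Prod.Lex.lt_iff]
      simp only [ofLex_toLex]
      right
      refine ⟨by trivial, ?_⟩
      rcases Prod.Lex.le_iff.mp hab with h | ⟨h, _⟩
      · exact h
      · exact absurd h habne
    · intro a ha b hb
      have ha1 : a.1 < (po.length : Int) := by
        have := (List.mem_filter.mp ha).1
        rw [PySem.List.mem_enumerate_iff] at this
        obtain ⟨k, hk, rfl⟩ := this
        simpa using hk
      obtain ⟨kv, _, rfl⟩ := List.mem_map.mp hb
      rw [Prod.Lex.lt_iff]
      simp only [ofLex_toLex]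
      left; exact ha1

-- the preferred block formats to A's first-phase parts
theorem pv_enum_filter_map {β : Type} (po : List String) (s : Int)
    (cond : String → Bool) (g : String → β) :
    ((PySem.List.enumerate po s).filter (fun p => cond p.2)).map (fun p => g p.2)
      = (po.filter cond).map g := by
  induction po generalizing s with
  | nil => simp [PySem.List.enumerate_nil]
  | cons x xs ih =>
    rw [PySem.List.enumerate_cons]
    by_cases h : cond x
    · simp only [List.filter_cons, h, if_pos]
      simp only [List.map_cons]
      rw [ih]
    · simp only [List.filter_cons, h]
      simp only [Bool.false_eq_true, if_false]
      rw [ih]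

theorem pv_g1_map (counter : List (String × Int)) (po : List String) :
    (pvGroup1 counter po).map (fun p => pvFmt p.2 ((List.lookup p.2 counter).getD 0))
      = (po.filter (fun k => decide ((List.lookup k counter).getD 0 > 0))).map
          (fun k => pvFmt k ((List.lookup k counter).getD 0)) := by
  unfold pvGroup1
  exact pv_enum_filter_map po 0 (fun k => decide ((List.lookup k counter).getD 0 > 0))
    (fun k => pvFmt k ((List.lookup k counter).getD 0))

-- the rest block formats to A's second-phase parts
theorem pv_rest2_map (counter : List (String × Int)) (po : List String)
    (hc : (counter.map Prod.fst).Nodup) :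
    (pvRest2 counter po).map (fun p => pvFmt p.2 ((List.lookup p.2 counter).getD 0))
      = ((PySem.List.sorted2 counter (fun kv => kv.1) fun kv => kv.2).filter
          (fun kv => !PySem.Set.contains
              (PySem.Set.ofList (po.filter (fun k => decide ((List.lookup k counter).getD 0 > 0)))) kv.1
            && decide (kv.2 > 0))).map (fun kv => pvFmt kv.1 kv.2) := by
  unfold pvRest2
  rw [List.map_map]
  have hfilters : (PySem.List.sorted2 counter (fun kv => kv.1) (fun kv => kv.2)).filter
        (fun kv => decide (kv.2 > 0) && !PySem.Set.contains (PySem.Set.ofList po) kv.1)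
      = (PySem.List.sorted2 counter (fun kv => kv.1) (fun kv => kv.2)).filter
        (fun kv => !PySem.Set.contains
            (PySem.Set.ofList (po.filter (fun k => decide ((List.lookup k counter).getD 0 > 0)))) kv.1
          && decide (kv.2 > 0)) := by
    apply List.filter_congr
    intro kv hkv
    have hmemc : (kv.1, kv.2) ∈ counter := by
      have := (PySem.List.sorted2_perm counter (fun kv => kv.1) (fun kv => kv.2) false).subset hkv
      simpa using this
    by_cases hpos : kv.2 > 0
    · have hl : List.lookup kv.1 counter = some kv.2 := (pv_lookup_nodup counter hc kv.1 kv.2).mp hmemc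
      have hcond : decide ((List.lookup kv.1 counter).getD 0 > 0) = true := by
        rw [hl]; exact decide_eq_true hpos
      have hcont1 : PySem.Set.contains (PySem.Set.ofList po) kv.1 = decide (kv.1 ∈ po) := by
        by_cases hpo : kv.1 ∈ po
        · rw [(PySem.Set.contains_iff _ _).mpr ((PySem.Set.mem_ofList _ _).mpr hpo), decide_eq_true hpo]
        · have hfalse : PySem.Set.contains (PySem.Set.ofList po) kv.1 = false := by
            rw [Bool.eq_false_iff]
            intro h
            exact hpo ((PySem.Set.mem_ofList _ _).mp ((PySem.Set.contains_iff _ _).mp h))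
          rw [hfalse, decide_eq_false hpo]
      have hcont2 : PySem.Set.contains
          (PySem.Set.ofList (po.filter (fun k => decide ((List.lookup k counter).getD 0 > 0)))) kv.1
          = decide (kv.1 ∈ po) := by
        by_cases hpo : kv.1 ∈ po
        · have hmemP : kv.1 ∈ PySem.Set.ofList (po.filter (fun k => decide ((List.lookup k counter).getD 0 > 0))) :=
            (PySem.Set.mem_ofList _ _).mpr (List.mem_filter.mpr ⟨hpo, hcond⟩)
          rw [(PySem.Set.contains_iff _ _).mpr hmemP, decide_eq_true hpo]
        · have hnm : kv.1 ∉ PySem.Set.ofList (po.filter (fun k => decide ((List.lookup k counter).getD 0 > 0))) :=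
            fun hmem => hpo (List.mem_filter.mp ((PySem.Set.mem_ofList _ _).mp hmem)).1
          have hfalse : PySem.Set.contains
              (PySem.Set.ofList (po.filter (fun k => decide ((List.lookup k counter).getD 0 > 0)))) kv.1 = false := by
            rw [Bool.eq_false_iff]
            intro h
            exact hnm ((PySem.Set.contains_iff _ _).mp h)
          rw [hfalse, decide_eq_false hpo]
      rw [hcont1, hcont2, Bool.and_comm]
    · have hdec : decide (kv.2 > 0) = false := decide_eq_false hpos
      simp [hdec]
  rw [hfilters]
  apply List.map_congr_left
  intro kv hkv
  have hmemc : (kv.1, kv.2) ∈ counter := by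
    have hsub := (PySem.List.sorted2_perm counter (fun kv => kv.1) (fun kv => kv.2) false).subset
      (List.mem_of_mem_filter hkv)
    simpa using hsub
  have hl : List.lookup kv.1 counter = some kv.2 := (pv_lookup_nodup counter hc kv.1 kv.2).mp hmemc
  simp [hl]

theorem counter_text_py_spec : Claim_equal_counter_text_py := by
  intro counter po hdom hc
  unfold Pre_counter_text_py at hc
  unfold Spec_counter_text_py
  simp only [counter_text_py, counter_text_py_alt]
  have h1 : List.foldl
        (fun (acc : List String × PySem.Set String) key =>
          if decide ((List.lookup key counter).getD 0 > 0) then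
            (acc.1 ++ [pvFmt key ((List.lookup key counter).getD 0)], PySem.Set.add acc.2 key)
          else acc)
        ([], PySem.Set.empty) po
      = ((po.filter (fun k => decide ((List.lookup k counter).getD 0 > 0))).map
           (fun k => pvFmt k ((List.lookup k counter).getD 0)),
         PySem.Set.ofList (po.filter (fun k => decide ((List.lookup k counter).getD 0 > 0)))) := by
    rw [show (fun (acc : List String × PySem.Set String) key =>
          if decide ((List.lookup key counter).getD 0 > 0) then
            (acc.1 ++ [pvFmt key ((List.lookup key counter).getD 0)], PySem.Set.add acc.2 key)
          else acc)
        = (fun (acc : List String × PySem.Set String) key =>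
            ((fun (s : List String) key =>
                if decide ((List.lookup key counter).getD 0 > 0) then
                  s ++ [pvFmt key ((List.lookup key counter).getD 0)] else s) acc.1 key,
             (fun (s : PySem.Set String) key =>
                if decide ((List.lookup key counter).getD 0 > 0) then
                  PySem.Set.add s key else s) acc.2 key)) from by
      funext acc key
      by_cases h : decide ((List.lookup key counter).getD 0 > 0) = true <;> simp [h]]
    rw [PySem.List.foldl_prod_mk
        (f := fun (s : List String) key =>
          if decide ((List.lookup key counter).getD 0 > 0) then
            s ++ [pvFmt key ((List.lookup key counter).getD 0)] else s)
        (g := fun (s : PySem.Set String) key =>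
          if decide ((List.lookup key counter).getD 0 > 0) then PySem.Set.add s key else s)]
    simp only [Prod.mk.injEq]
    constructor
    · simpa using PySem.List.foldl_append_if
        (fun k => decide ((List.lookup k counter).getD 0 > 0))
        (fun k => pvFmt k ((List.lookup k counter).getD 0)) po []
    · rw [PySem.List.foldl_if_eq_foldl_filter, PySem.Set.ofList_eq_foldl]
      rfl
  rw [h1]
  dsimp only
  rw [PySem.List.foldl_append_if
      (fun kv : String × Int => !PySem.Set.contains
          (PySem.Set.ofList (po.filter (fun k => decide ((List.lookup k counter).getD 0 > 0)))) kv.1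
        && decide (kv.2 > 0))
      (fun kv : String × Int => pvFmt kv.1 kv.2)]
  rw [show (PySem.List.enumerate po).filter
        (fun p => decide ((List.lookup p.2 counter).getD 0 > 0)) = pvGroup1 counter po from rfl]
  rw [pv_sortedTagged_eq counter po hc]
  rw [List.map_append]
  rw [pv_g1_map counter po, pv_rest2_map counter po hc]
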